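-- pv_equiv track=rewrite | github.com/SaiSudhaV/coding_platforms | bench_press.py | collected_weights
-- ===== SOURCE A (Python) =====
-- from math import ceil
--
-- def collected_weights(ar, n, a, b):
--     tem, res = set(), []
--     for i in ar:
--         if i in tem:
--             res.append(i)
--             tem.remove(i)
--         else:
--             tem.add(i)
--     return "YES" if a <= b or sum(res) >= ceil((a - b) / 2) else "NO"
-- ===== SOURCE B (Python) =====
-- from math import ceil
--
-- def collected_weights(ar, n, a, b):
--     if a <= b:
--         return "YES"
--     s = sorted(ar)
--     total = 0
--     i = 0
--     while i + 1 < len(s):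
--         if s[i] == s[i + 1]:
--             total += s[i]
--             i += 2
--         else:
--             i += 1
--     return "YES" if total >= ceil((a - b) / 2) else "NO"
-- ===== Notes on version B (the rewrite author's own statement) =====
-- stated objective: alternative
-- what changed: Replaces the hash-set add/remove toggle with a growing result list by sorting the list and doing one adjacent-equal scan with a running total (equal values become adjacent, so greedy pairing of neighbours collects exactly floor(count/2) pairs per value), with an early return when a <= b.
import Mathlib
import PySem

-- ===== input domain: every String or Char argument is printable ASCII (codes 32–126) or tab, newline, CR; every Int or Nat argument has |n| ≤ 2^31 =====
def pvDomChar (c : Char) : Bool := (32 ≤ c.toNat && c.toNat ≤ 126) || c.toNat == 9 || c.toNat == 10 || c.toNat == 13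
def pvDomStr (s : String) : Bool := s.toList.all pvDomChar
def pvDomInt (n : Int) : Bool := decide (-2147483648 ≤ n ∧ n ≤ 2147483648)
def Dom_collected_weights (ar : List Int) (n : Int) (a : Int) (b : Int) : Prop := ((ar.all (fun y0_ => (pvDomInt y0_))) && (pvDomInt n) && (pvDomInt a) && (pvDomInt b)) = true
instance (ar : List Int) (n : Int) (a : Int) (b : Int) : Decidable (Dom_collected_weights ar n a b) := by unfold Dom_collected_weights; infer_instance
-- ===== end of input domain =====

-- B replaces A's per-element hash-set toggle by sort-then-adjacent-scan: sort the list,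
-- then one pass pairing equal neighbours into a running total (objective: alternative).

-- ===== PORT A =====
-- loop body of A's 'for i in ar': tem.remove(i) is guarded by the membership test,
-- so it is exactly Set.discard here (no KeyError is reachable).
def pvStepA (st : PySem.Set Int × List Int) (i : Int) : PySem.Set Int × List Int :=
  if PySem.Set.contains st.1 i then (PySem.Set.discard st.1 i, st.2 ++ [i])
  else (PySem.Set.add st.1 i, st.2)

-- ceil((a-b)/2): a-b is an int with |a-b| ≤ 2^32, so the float quotient is exact and
-- math.ceil is integer ceiling division, ported exactly as -((-(a-b)) // 2).
def collected_weights (ar : List Int) (_n : Int) (a : Int) (b : Int) : String :=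
  let st := ar.foldl pvStepA (PySem.Set.empty, [])
  if a ≤ b ∨ st.2.sum ≥ -(PySem.Int.floordiv (-(a - b)) 2) then "YES" else "NO"

-- ===== PORT B =====
-- Source B's while loop over index i of the sorted list reads only s[i], s[i+1] and advances
-- by 1 or 2: it is ported as the obvious structural recursion consuming the list at i.
def pvScanB : List Int → Int
  | x :: y :: rest => if x = y then x + pvScanB rest else pvScanB (y :: rest)
  | _ => 0

-- early return on a <= b; same exact ceil port as in A (the formula Source B itself contains).
def collected_weights_alt (ar : List Int) (_n : Int) (a : Int) (b : Int) : String :=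
  if a ≤ b then "YES"
  else
    let s := PySem.List.sorted ar (fun x => x) false
    if pvScanB s ≥ -(PySem.Int.floordiv (-(a - b)) 2) then "YES" else "NO"

-- ===== PRECONDITION & SPEC =====
def Spec_collected_weights (ar : List Int) (n : Int) (a : Int) (b : Int) (out : String) : Prop := out = collected_weights_alt ar n a b
instance (ar : List Int) (n : Int) (a : Int) (b : Int) (out : String) : Decidable (Spec_collected_weights ar n a b out) := by unfold Spec_collected_weights; infer_instance

-- ===== CLAIM =====
def Claim_equal_collected_weights : Prop := ∀ (ar : List Int) (n : Int) (a : Int) (b : Int), Dom_collected_weights ar n a b → Spec_collected_weights ar n a b (collected_weights ar n a b)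

-- ===== LEMMAS AND PROOFS =====

-- the quantity both programs compute: Σ_{v distinct in ar} v * (count v / 2)
def pvPairSum (ar : List Int) : Int :=
  ((PySem.Set.ofList ar).map (fun v => v * ((ar.count v / 2 : Nat) : Int))).sum

lemma pvPairSum_eq_finset (l : List Int) :
    pvPairSum l = ∑ v ∈ l.toFinset, v * ((l.count v / 2 : Nat) : Int) := by
  have h1 : pvPairSum l
      = ∑ v ∈ (PySem.Set.ofList l).toFinset, v * ((l.count v / 2 : Nat) : Int) :=
    Eq.symm (List.sum_toFinset _ (PySem.Set.nodup_ofList l))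
  rw [h1]
  congr 1
  ext v
  simp [List.mem_toFinset, PySem.Set.mem_ofList]

lemma pvPairSum_perm {l1 l2 : List Int} (h : l1.Perm l2) : pvPairSum l1 = pvPairSum l2 := by
  rw [pvPairSum_eq_finset, pvPairSum_eq_finset, List.toFinset_eq_of_perm l1 l2 h]
  apply Finset.sum_congr rfl
  intro v _
  rw [h.count_eq]

lemma pvPairSum_cons_cons (x : Int) (l : List Int) :
    pvPairSum (x :: x :: l) = x + pvPairSum l := by
  rw [pvPairSum_eq_finset, pvPairSum_eq_finset]
  have hcount : ∀ v : Int, (x :: x :: l).count v = l.count v + (if v = x then 2 else 0) := by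
    intro v
    by_cases h : v = x
    · subst h; simp
    · have h' : ¬x = v := fun hh => h hh.symm
      simp [h, h']
  have htf : (x :: x :: l).toFinset = insert x l.toFinset := by simp
  by_cases hmem : x ∈ l.toFinset
  · rw [htf, Finset.insert_eq_self.mpr hmem,
      ← Finset.add_sum_erase _ _ hmem,
      ← Finset.add_sum_erase _ (fun v => v * ((l.count v / 2 : Nat) : Int)) hmem]
    have hterm : x * (((x :: x :: l).count x / 2 : Nat) : Int)
        = x * ((l.count x / 2 : Nat) : Int) + x := by
      rw [hcount x]
      have h2 : (l.count x + 2) / 2 = l.count x / 2 + 1 := by omega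
      simp [h2]
      ring
    have hrest : ∑ v ∈ l.toFinset.erase x, v * (((x :: x :: l).count v / 2 : Nat) : Int)
        = ∑ v ∈ l.toFinset.erase x, v * ((l.count v / 2 : Nat) : Int) := by
      apply Finset.sum_congr rfl
      intro v hv
      rw [hcount v]
      simp [Finset.ne_of_mem_erase hv]
    rw [hterm, hrest]
    ring
  · have hcx : l.count x = 0 := List.count_eq_zero.mpr (fun h => hmem (List.mem_toFinset.mpr h))
    have hterm : x * (((x :: x :: l).count x / 2 : Nat) : Int) = x := by
      rw [hcount x]; simp [hcx]
    rw [htf, Finset.sum_insert hmem, hterm]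
    congr 1
    apply Finset.sum_congr rfl
    intro v hv
    have hvx : v ≠ x := fun h => hmem (h ▸ hv)
    rw [hcount v]
    simp [hvx]

lemma pvPairSum_cons_notMem (x : Int) (l : List Int) (hx : x ∉ l) :
    pvPairSum (x :: l) = pvPairSum l := by
  rw [pvPairSum_eq_finset, pvPairSum_eq_finset]
  have hcount : ∀ v : Int, (x :: l).count v = l.count v + (if v = x then 1 else 0) := by
    intro v
    by_cases h : v = x
    · subst h; simp
    · have h' : ¬x = v := fun hh => h hh.symm
      simp [h, h']
  have hmem : x ∉ l.toFinset := fun h => hx (List.mem_toFinset.mp h)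
  have hcx : l.count x = 0 := List.count_eq_zero.mpr hx
  have hterm : x * (((x :: l).count x / 2 : Nat) : Int) = 0 := by
    rw [hcount x]; simp [hcx]
  rw [List.toFinset_cons, Finset.sum_insert hmem, hterm, zero_add]
  apply Finset.sum_congr rfl
  intro v hv
  have hvx : v ≠ x := fun h => hmem (h ▸ hv)
  rw [hcount v]
  simp [hvx]

lemma scan_sorted (s : List Int) (hs : s.Pairwise (· ≤ ·)) : pvScanB s = pvPairSum s := by
  induction s using pvScanB.induct with
  | case1 x rest ih =>
    obtain ⟨_, htail⟩ := List.pairwise_cons.mp hs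
    obtain ⟨_, hrest⟩ := List.pairwise_cons.mp htail
    rw [pvScanB, if_pos rfl, ih hrest, pvPairSum_cons_cons]
  | case2 x y rest hne ih =>
    obtain ⟨hxle, htail⟩ := List.pairwise_cons.mp hs
    have hxnot : x ∉ y :: rest := by
      intro hmem
      rcases List.mem_cons.mp hmem with rfl | hmem'
      · exact hne rfl
      · obtain ⟨hyle, _⟩ := List.pairwise_cons.mp htail
        have h1 : x ≤ y := hxle y List.mem_cons_self
        have h2 : y ≤ x := hyle x hmem'
        exact hne (le_antisymm h1 h2)
    rw [pvScanB, if_neg hne, ih htail, pvPairSum_cons_notMem x _ hxnot]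
  | case3 s h =>
    cases s with
    | nil => simp [pvScanB, pvPairSum, PySem.Set.ofList]
    | cons x t =>
      cases t with
      | nil =>
        rw [show pvScanB [x] = 0 from rfl, pvPairSum_eq_finset]
        simp
      | cons y rest => exact (h x y rest rfl).elim

-- A's loop invariant: tem holds the odd-count values and sum(res) is pvPairSum
lemma A_loop (ar : List Int) :
    (ar.foldl pvStepA (PySem.Set.empty, [])).1.Nodup ∧
    (∀ v : Int, v ∈ (ar.foldl pvStepA (PySem.Set.empty, [])).1 ↔ ar.count v % 2 = 1) ∧
    (ar.foldl pvStepA (PySem.Set.empty, [])).2.sum = pvPairSum ar := by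
  induction ar using List.reverseRecOn with
  | nil => simp [PySem.Set.empty, pvPairSum, PySem.Set.ofList]
  | append_singleton xs x ih =>
    obtain ⟨hnd, hmem, hsum⟩ := ih
    rw [List.foldl_append] at *
    set S := xs.foldl pvStepA (PySem.Set.empty, []) with hS
    have hcount : ∀ v : Int, (xs ++ [x]).count v = xs.count v + (if v = x then 1 else 0) := by
      intro v
      by_cases h : v = x
      · simp [List.count_append, h]
      · have h' : ¬x = v := fun hh => h hh.symm
        simp [List.count_append, h, h']
    by_cases hc : PySem.Set.contains S.1 x
    · have hx : x ∈ S.1 := (PySem.Set.contains_iff _ _).mp hc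
      have hodd : xs.count x % 2 = 1 := (hmem x).mp hx
      have hxin : x ∈ xs := List.count_pos_iff.mp (by omega)
      simp only [List.foldl_cons, List.foldl_nil, pvStepA, hc, if_pos]
      refine ⟨PySem.Set.nodup_discard _ _ hnd, ?_, ?_⟩
      · intro v
        rw [PySem.Set.mem_discard, hmem v, hcount v]
        by_cases h : v = x
        · simp [h]; omega
        · have h' : ¬x = v := fun hh => h hh.symm
          simp [h]
          try omega
      · rw [List.sum_append, List.sum_cons, List.sum_nil, hsum,
          pvPairSum_eq_finset, pvPairSum_eq_finset]
        have htf : (xs ++ [x]).toFinset = xs.toFinset := by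
          ext v
          simp only [List.mem_toFinset, List.mem_append, List.mem_singleton]
          constructor
          · rintro (h | rfl)
            · exact h
            · exact hxin
          · exact Or.inl
        rw [htf]
        rw [← Finset.add_sum_erase _ _ (List.mem_toFinset.mpr hxin),
            ← Finset.add_sum_erase _ (fun v => v * (((xs ++ [x]).count v / 2 : Nat) : Int))
              (List.mem_toFinset.mpr hxin)]
        have hterm : x * (((xs ++ [x]).count x / 2 : Nat) : Int)
            = x * ((xs.count x / 2 : Nat) : Int) + x := by
          rw [hcount x]
          have h2 : (xs.count x + 1) / 2 = xs.count x / 2 + 1 := by omega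
          simp [h2]; ring
        have hrest : ∑ v ∈ xs.toFinset.erase x, v * (((xs ++ [x]).count v / 2 : Nat) : Int)
            = ∑ v ∈ xs.toFinset.erase x, v * ((xs.count v / 2 : Nat) : Int) := by
          apply Finset.sum_congr rfl
          intro v hv
          rw [hcount v]
          simp [Finset.ne_of_mem_erase hv]
        rw [hterm, hrest]; ring
    · have hx : x ∉ S.1 := fun h => hc ((PySem.Set.contains_iff _ _).mpr h)
      have heven : xs.count x % 2 = 0 := by
        have := (hmem x).not.mp hx; omega
      simp only [List.foldl_cons, List.foldl_nil, pvStepA, hc, Bool.false_eq_true, if_false]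
      refine ⟨PySem.Set.nodup_add _ _ hnd, ?_, ?_⟩
      · intro v
        rw [PySem.Set.mem_add, hmem v, hcount v]
        by_cases h : v = x
        · simp [h]; omega
        · have h' : ¬x = v := fun hh => h hh.symm
          simp [h]
          try omega
      · rw [hsum, pvPairSum_eq_finset, pvPairSum_eq_finset]
        have htf : (xs ++ [x]).toFinset = insert x xs.toFinset := by
          ext v; simp [List.mem_toFinset]
        rw [htf]
        by_cases hxin : x ∈ xs
        · rw [Finset.insert_eq_self.mpr (List.mem_toFinset.mpr hxin)]
          apply Finset.sum_congr rfl
          intro v hv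
          rw [hcount v]
          by_cases h : v = x
          · subst h
            have hc2 : xs.count v % 2 = 0 := heven
            have h2 : (xs.count v + 1) / 2 = xs.count v / 2 := by omega
            simp [h2]
          · simp [h]
        · have hcx : xs.count x = 0 := List.count_eq_zero.mpr hxin
          have hx0 : (((xs ++ [x]).count x / 2 : Nat) : Int) = 0 := by
            rw [hcount x]; simp [hcx]
          rw [Finset.sum_insert (by simp [List.mem_toFinset, hxin]), hx0, mul_zero, zero_add]
          apply Finset.sum_congr rfl
          intro v hv
          have hvx : v ≠ x := fun h => hxin (h ▸ List.mem_toFinset.mp hv)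
          rw [hcount v]; simp [hvx]

-- ===== VERDICT =====
theorem collected_weights_spec : Claim_equal_collected_weights := by
  intro ar n a b _
  dsimp only [Spec_collected_weights, collected_weights, collected_weights_alt]
  have hscan : pvScanB (PySem.List.sorted ar (fun x => x) false)
      = (ar.foldl pvStepA (PySem.Set.empty, [])).2.sum := by
    rw [scan_sorted _ (PySem.List.sorted_pairwise ar (fun x => x)), (A_loop ar).2.2]
    exact pvPairSum_perm (PySem.List.sorted_perm ar (fun x => x) false)
  by_cases hab : a ≤ b
  · simp [hab]
  · simp [hab, hscan]
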